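-- pv_equiv track=rewrite | github.com/mathiasbockwoldt/samegame | shrinkField_samegame.py | findAreas
-- ===== SOURCE A (Python) =====
-- def floodFill(b, x, y):
-- 	'''
-- 	Returns all elements that belong to a field starting with a given coordinate. Uses a iterative floodfill algorithm using a not-so-standard queue approach using a set.
-- 	This method does NOT change the board!
--
-- 	:param x: The x-coordinate (column) of the element to start from
-- 	:param y: The y-coordinate (row) of the element to start from
-- 	:returns: A set of tuples with coordinates (x,y) that belong to the field
-- 	'''
--
-- 	color = b[x][y]
-- 	toChange = set()
-- 	toChange.add((x, y))
-- 	toFill = set()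
-- 	toFill.add((x, y))
-- 	while toFill:
-- 		x, y = toFill.pop()
--
-- 		toChange.add((x, y))
--
-- 		if x > 0 and len(b[x-1]) > y and b[x-1][y] == color and (x-1, y) not in toChange:
-- 			toFill.add((x-1, y))
--
-- 		if x < len(b) - 1 and len(b[x+1]) > y and b[x+1][y] == color and (x+1, y) not in toChange:
-- 			toFill.add((x+1, y))
--
-- 		if y > 0 and b[x][y-1] == color and (x, y-1) not in toChange:
-- 			toFill.add((x, y-1))
--
-- 		if y < len(b[x]) - 1 and b[x][y+1] == color and (x, y+1) not in toChange:
-- 			toFill.add((x, y+1))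
--
-- 	return toChange
--
-- def findAreas(b):
-- 	'''
-- 	Finds all clickable areas with more than one element in the board.
-- 	'''
--
-- 	inArea = set()
-- 	areaEntries = []
--
-- 	for x in range(len(b)):
-- 		for y in range(len(b[x])):
-- 			if b[x][y] and (x, y) not in inArea:
-- 				area = floodFill(b, x, y)
-- 				inArea.update(area)
-- 				if len(area) > 1:
-- 					areaEntries.append((x, y, len(area), area))
--
-- 	return areaEntries
-- ===== SOURCE B (Python) =====
-- def findAreas(b):
-- 	'''
-- 	Finds all clickable areas with more than one element in the board.
--
-- 	Alternative algorithm: connected-component labelling by in-place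
-- 	min-label relaxation (with pointer jumping) instead of a per-seed
-- 	flood fill; each component's label converges to its row-major-minimum
-- 	cell, which is exactly the first cell A's scan reaches.
-- 	'''
--
-- 	cells = [(x, y) for x in range(len(b)) for y in range(len(b[x]))]
-- 	label = {c: c for c in cells}
-- 	changed = True
-- 	while changed:
-- 		changed = False
-- 		for (x, y) in cells:
-- 			m = label[(x, y)]
-- 			for (i, j) in ((x - 1, y), (x + 1, y), (x, y - 1), (x, y + 1)):
-- 				if 0 <= i < len(b) and 0 <= j < len(b[i]) and b[i][j] == b[x][y] and label[(i, j)] < m: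
-- 					m = label[(i, j)]
-- 			m = label[m]  # pointer jumping: shortcut to the label's own label
-- 			if m < label[(x, y)]:
-- 				label[(x, y)] = m
-- 				changed = True
--
-- 	comps = {}
-- 	for c in cells:
-- 		comps.setdefault(label[c], set()).add(c)
--
-- 	entries = []
-- 	for (x, y), comp in comps.items():
-- 		if b[x][y] and len(comp) > 1:
-- 			entries.append((x, y, len(comp), comp))
-- 	return entries
-- ===== Notes on version B (the rewrite author's own statement) =====
-- stated objective: alternative
-- what changed: Replaces the per-seed set-worklist flood fill with connected-component labelling: every cell's label is relaxed in passes (with pointer jumping) to the row-major-minimum cell of its same-color component, and components are then grouped by label in one pass, emitting each >1-sized truthy component at its minimum cell — the same cell, size, set and order A produces.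
import Mathlib
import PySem

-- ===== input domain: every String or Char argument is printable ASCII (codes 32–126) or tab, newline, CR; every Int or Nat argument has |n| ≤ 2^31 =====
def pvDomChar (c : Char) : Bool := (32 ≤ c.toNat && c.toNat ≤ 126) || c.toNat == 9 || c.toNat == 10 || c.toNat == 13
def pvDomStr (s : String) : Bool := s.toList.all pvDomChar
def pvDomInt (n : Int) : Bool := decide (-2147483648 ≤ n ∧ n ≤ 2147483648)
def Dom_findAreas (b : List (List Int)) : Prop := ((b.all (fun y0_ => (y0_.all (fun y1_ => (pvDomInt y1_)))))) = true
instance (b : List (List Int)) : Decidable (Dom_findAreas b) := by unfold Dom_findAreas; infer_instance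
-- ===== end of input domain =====

-- B replaces A's per-seed set-worklist flood fill by min-label relaxation (connected-component
-- labelling) plus one grouping pass; same return value, different algorithm (objective: alternative).
-- Python's 'set' values are unordered; both ports represent every cell set in row-major board order.

-- shared helpers: board access and the row-major list of valid cell coordinates
def rowAt (b : List (List Int)) (x : Int) : List Int := PySem.List.pyGetD b x []
def colorAt (b : List (List Int)) (p : Int × Int) : Int := PySem.List.pyGetD (rowAt b p.1) p.2 0
def isCell (b : List (List Int)) (p : Int × Int) : Bool :=
  decide (0 ≤ p.1) && decide (p.1 < (b.length : Int)) && decide (0 ≤ p.2) && decide (p.2 < ((rowAt b p.1).length : Int))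
def cellList (b : List (List Int)) : List (Int × Int) :=
  (List.range b.length).flatMap (fun x => (List.range (b.getD x []).length).map (fun y => (Int.ofNat x, Int.ofNat y)))

-- ===== PORT A =====
-- the while-loop of floodFill; Python pops an arbitrary element of the set toFill (hash order,
-- unspecified) — this port pops the first; fuel (number of cells + 1) bounds the loop, proven sufficient
def addIf (g : Bool) (s : PySem.Set (Int × Int)) (p : Int × Int) : PySem.Set (Int × Int) :=
  if g then PySem.Set.add s p else s

def ffStep (b : List (List Int)) (color : Int) (toChange1 rest : PySem.Set (Int × Int))
    (x y : Int) : PySem.Set (Int × Int) :=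
  let f1 := addIf (x > 0 && ((rowAt b (x - 1)).length : Int) > y && colorAt b (x - 1, y) == color
               && !(PySem.Set.contains toChange1 (x - 1, y))) rest (x - 1, y)
  let f2 := addIf (x < (b.length : Int) - 1 && ((rowAt b (x + 1)).length : Int) > y && colorAt b (x + 1, y) == color
               && !(PySem.Set.contains toChange1 (x + 1, y))) f1 (x + 1, y)
  let f3 := addIf (y > 0 && colorAt b (x, y - 1) == color && !(PySem.Set.contains toChange1 (x, y - 1))) f2 (x, y - 1)
  let f4 := addIf (y < ((rowAt b x).length : Int) - 1 && colorAt b (x, y + 1) == color && !(PySem.Set.contains toChange1 (x, y + 1))) f3 (x, y + 1)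
  f4

def floodFillLoop (b : List (List Int)) (color : Int) :
    Nat → PySem.Set (Int × Int) → PySem.Set (Int × Int) → PySem.Set (Int × Int)
  | 0, toChange, _ => toChange
  | fuel + 1, toChange, toFill =>
    match toFill with
    | [] => toChange
    | (x, y) :: rest =>
      let toChange1 := PySem.Set.add toChange (x, y)
      floodFillLoop b color fuel toChange1 (ffStep b color toChange1 rest x y)

-- Python returns the unordered set toChange; represented canonically in row-major board order
def floodFill (b : List (List Int)) (x y : Int) : PySem.Set (Int × Int) :=
  let color := colorAt b (x, y)
  let res := floodFillLoop b color ((cellList b).length + 1)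
      (PySem.Set.add PySem.Set.empty (x, y)) (PySem.Set.add PySem.Set.empty (x, y))
  (cellList b).filter (fun c => PySem.Set.contains res c)

def findAreas (b : List (List Int)) : List (Int × Int × Int × (List (Int × Int))) :=
  ((List.range b.length).foldl (fun st x =>
    (List.range (b.getD x []).length).foldl (fun (st : PySem.Set (Int × Int) × List (Int × Int × Int × (List (Int × Int)))) y =>
      let c : Int × Int := (Int.ofNat x, Int.ofNat y)
      if !(colorAt b c == 0) && !(PySem.Set.contains st.1 c) then
        let area := floodFill b c.1 c.2
        let inArea := PySem.Set.update st.1 area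
        if 1 < area.length then (inArea, st.2 ++ [(c.1, c.2, (area.length : Int), area)])
        else (inArea, st.2)
      else st) st)
    (PySem.Set.empty, [])).2

-- ===== PORT B =====
-- Python tuple comparison (i, j) < (m1, m2) is lexicographic
def cellLt (p q : Int × Int) : Bool := decide (p.1 < q.1 ∨ (p.1 = q.1 ∧ p.2 < q.2))

-- the body of one relaxation step at cell c: the minimum label among c and its same-color
-- in-bounds neighbours, then one pointer jump (m = label[m])
def relaxCell (b : List (List Int)) (label : PySem.Dict (Int × Int) (Int × Int)) (c : Int × Int) : Int × Int :=
  let m := [(c.1 - 1, c.2), (c.1 + 1, c.2), (c.1, c.2 - 1), (c.1, c.2 + 1)].foldl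
    (fun m d =>
      if isCell b d && colorAt b d == colorAt b c && cellLt (label.getD d d) m then label.getD d d else m)
    (label.getD c c)
  label.getD m m

-- one full pass over all cells (Python's body of 'while changed'); state = (label, changed)
def relaxPass (b : List (List Int)) (st : PySem.Dict (Int × Int) (Int × Int) × Bool) :
    PySem.Dict (Int × Int) (Int × Int) × Bool :=
  (cellList b).foldl (fun st c =>
    let m := relaxCell b st.1 c
    if cellLt m (st.1.getD c c) then (st.1.insert c m, true) else st) st

-- the while-loop; fuel (cells² + 1) bounds the number of passes, proven sufficient
def relaxLoop (b : List (List Int)) :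
    Nat → PySem.Dict (Int × Int) (Int × Int) → PySem.Dict (Int × Int) (Int × Int)
  | 0, label => label
  | fuel + 1, label =>
    let st := relaxPass b (label, false)
    if st.2 then relaxLoop b fuel st.1 else st.1

def findAreas_alt (b : List (List Int)) : List (Int × Int × Int × (List (Int × Int))) :=
  let cells := cellList b
  let label0 : PySem.Dict (Int × Int) (Int × Int) := cells.foldl (fun d c => d.insert c c) PySem.Dict.empty
  let label := relaxLoop b (cells.length * cells.length + 1) label0
  -- comps.setdefault(label[c], set()).add(c): append the key with {c} if absent, else add c in place
  let comps : PySem.Dict (Int × Int) (PySem.Set (Int × Int)) :=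
    cells.foldl (fun d c =>
      let r := label.getD c c
      d.insert r (PySem.Set.add (d.getD r PySem.Set.empty) c)) PySem.Dict.empty
  comps.items.foldl (fun out rc =>
    if !(colorAt b rc.1 == 0) && 1 < PySem.Set.len rc.2 then
      out ++ [(rc.1.1, rc.1.2, (PySem.Set.len rc.2 : Int), rc.2)]
    else out) []

-- ===== PRECONDITION & SPEC =====
def Spec_findAreas (b : List (List Int)) (out : List (Int × Int × Int × (List (Int × Int)))) : Prop := out = findAreas_alt b
instance (b : List (List Int)) (out : List (Int × Int × Int × (List (Int × Int)))) : Decidable (Spec_findAreas b out) := by unfold Spec_findAreas; infer_instance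

-- ===== CLAIM (what is proved, stated in full; the proofs are below) =====
def Claim_equal_findAreas : Prop := ∀ (b : List (List Int)), Dom_findAreas b → Spec_findAreas b (findAreas b)

-- ===== LEMMAS AND PROOFS =====

-- ---------- the lexicographic order on cells ----------
def cellLe (p q : Int × Int) : Prop := cellLt p q = true ∨ p = q

lemma cellLt_iff (p q : Int × Int) : cellLt p q = true ↔ (p.1 < q.1 ∨ (p.1 = q.1 ∧ p.2 < q.2)) := by
  simp [cellLt]

lemma cellLt_irrefl (p : Int × Int) : ¬ cellLt p p = true := by simp [cellLt_iff]

lemma cellLt_trans {p q r : Int × Int} (h1 : cellLt p q = true) (h2 : cellLt q r = true) :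
    cellLt p r = true := by
  rw [cellLt_iff] at *; omega

lemma cellLt_asymm {p q : Int × Int} (h : cellLt p q = true) : ¬ cellLt q p = true := by
  rw [cellLt_iff] at *; omega

lemma cellLe_refl (p : Int × Int) : cellLe p p := Or.inr rfl

lemma cellLe_trans {p q r : Int × Int} (h1 : cellLe p q) (h2 : cellLe q r) : cellLe p r := by
  rcases h1 with h1 | rfl
  · rcases h2 with h2 | rfl
    · exact Or.inl (cellLt_trans h1 h2)
    · exact Or.inl h1
  · exact h2

lemma cellLe_antisymm {p q : Int × Int} (h1 : cellLe p q) (h2 : cellLe q p) : p = q := by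
  rcases h1 with h1 | rfl
  · rcases h2 with h2 | rfl
    · exact absurd h2 (cellLt_asymm h1)
    · rfl
  · rfl

lemma cellLe_of_not_lt {p q : Int × Int} (h : ¬ cellLt p q = true) : cellLe q p := by
  by_cases he : q = p
  · exact Or.inr he
  · left
    rw [cellLt_iff] at h ⊢
    have hne : ¬ (q.1 = p.1 ∧ q.2 = p.2) := fun hc => he (Prod.ext_iff.mpr hc)
    omega

lemma cellLt_of_le_of_ne {p q : Int × Int} (h : cellLe p q) (hne : p ≠ q) : cellLt p q = true := by
  rcases h with h | rfl
  · exact h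
  · exact absurd rfl hne

lemma cellLe_of_lt_trans {p q r : Int × Int} (h1 : cellLe p q) (h2 : cellLt q r = true) :
    cellLt p r = true := by
  rcases h1 with h1 | rfl
  · exact cellLt_trans h1 h2
  · exact h2

-- ---------- cellList ----------
lemma rowAt_natCast (b : List (List Int)) (x : Nat) : rowAt b (x : Int) = b.getD x [] := by
  simp [rowAt, List.getD]

lemma mem_cellList {b : List (List Int)} {p : Int × Int} :
    p ∈ cellList b ↔ isCell b p = true := by
  constructor
  · intro hp
    obtain ⟨x, hx, hp⟩ := List.mem_flatMap.mp hp
    rw [List.mem_range] at hx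
    obtain ⟨y, hy, rfl⟩ := List.mem_map.mp hp
    rw [List.mem_range] at hy
    simp only [isCell, Int.ofNat_eq_natCast, rowAt_natCast, Bool.and_eq_true, decide_eq_true_eq]
    refine ⟨⟨⟨by omega, by exact_mod_cast hx⟩, by omega⟩, by exact_mod_cast hy⟩
  · intro hp
    simp only [isCell, Bool.and_eq_true, decide_eq_true_eq] at hp
    obtain ⟨⟨⟨h1, h2⟩, h3⟩, h4⟩ := hp
    have e1 : ((p.1.toNat : Nat) : Int) = p.1 := by omega
    have e2 : ((p.2.toNat : Nat) : Int) = p.2 := by omega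
    have hrow : rowAt b p.1 = b.getD p.1.toNat [] := by
      conv_lhs => rw [← e1]
      exact rowAt_natCast b p.1.toNat
    rw [hrow] at h4
    have hpair : (Int.ofNat p.1.toNat, Int.ofNat p.2.toNat) = p :=
      Prod.ext_iff.mpr ⟨e1, e2⟩
    have hx : p.1.toNat < b.length := by omega
    have hy : p.2.toNat < (b.getD p.1.toNat []).length := by omega
    exact List.mem_flatMap.mpr ⟨p.1.toNat, List.mem_range.mpr hx,
      List.mem_map.mpr ⟨p.2.toNat, List.mem_range.mpr hy, hpair⟩⟩

lemma pairwise_cellList (b : List (List Int)) :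
    (cellList b).Pairwise (fun p q => cellLt p q = true) := by
  unfold cellList
  rw [List.pairwise_flatMap]
  constructor
  · intro x _
    refine List.Pairwise.map _ ?_ List.pairwise_lt_range
    intro a c h
    rw [cellLt_iff]
    right
    refine ⟨rfl, ?_⟩
    show Int.ofNat a < Int.ofNat c
    simp only [Int.ofNat_eq_natCast]
    exact_mod_cast h
  · refine List.pairwise_lt_range.imp ?_
    intro x1 x2 h p hp q hq
    obtain ⟨y1, _, rfl⟩ := List.mem_map.mp hp
    obtain ⟨y2, _, rfl⟩ := List.mem_map.mp hq
    rw [cellLt_iff]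
    left
    show Int.ofNat x1 < Int.ofNat x2
    simp only [Int.ofNat_eq_natCast]
    exact_mod_cast h

lemma nodup_cellList (b : List (List Int)) : (cellList b).Nodup := by
  refine (pairwise_cellList b).imp ?_
  intro p q h
  rintro rfl
  exact cellLt_irrefl p h

-- a cell left of c in the row-major order lies in any decomposition's prefix
lemma mem_prefix_of_lt {b : List (List Int)} {P S : List (Int × Int)} {c q : Int × Int}
    (hdec : cellList b = P ++ c :: S) (hq : q ∈ cellList b) (hlt : cellLt q c = true) : q ∈ P := by
  rw [hdec] at hq
  rcases List.mem_append.mp hq with h | h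
  · exact h
  · rcases List.mem_cons.mp h with rfl | h
    · exact absurd hlt (cellLt_irrefl q)
    · have hpw := pairwise_cellList b
      rw [hdec] at hpw
      have := (List.pairwise_append.mp hpw).1
      have hcq : cellLt c q = true := by
        have hpw2 := (List.pairwise_append.mp hpw).2.1
        exact (List.pairwise_cons.mp hpw2).1 q h
      exact absurd hlt (cellLt_asymm hcq)

-- ---------- adjacency and reachability ----------
def adjB (b : List (List Int)) (p q : Int × Int) : Bool :=
  isCell b p && isCell b q && (colorAt b p == colorAt b q) &&
  (((p.1 == q.1) && ((p.2 - q.2 == 1) || (q.2 - p.2 == 1))) ||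
   ((p.2 == q.2) && ((p.1 - q.1 == 1) || (q.1 - p.1 == 1))))

def Reach (b : List (List Int)) (p q : Int × Int) : Prop :=
  Relation.ReflTransGen (fun u v => adjB b u v = true) p q

lemma adjB_symm {b : List (List Int)} {p q : Int × Int} (h : adjB b p q = true) : adjB b q p = true := by
  simp only [adjB, Bool.and_eq_true, Bool.or_eq_true, beq_iff_eq] at h ⊢
  obtain ⟨⟨⟨h1, h2⟩, h3⟩, h4⟩ := h
  refine ⟨⟨⟨h2, h1⟩, h3.symm⟩, by omega⟩

lemma adjB_cell_right {b : List (List Int)} {p q : Int × Int} (h : adjB b p q = true) :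
    isCell b q = true := by
  simp only [adjB, Bool.and_eq_true] at h; exact h.1.1.2

lemma adjB_color {b : List (List Int)} {p q : Int × Int} (h : adjB b p q = true) :
    colorAt b p = colorAt b q := by
  simp only [adjB, Bool.and_eq_true, beq_iff_eq] at h; exact h.1.2

lemma reach_symm {b : List (List Int)} {p q : Int × Int} (h : Reach b p q) : Reach b q p :=
  (Relation.ReflTransGen.symmetric (fun _ _ h => adjB_symm h)) h

lemma reach_cell {b : List (List Int)} {p q : Int × Int} (hp : isCell b p = true) (h : Reach b p q) :
    isCell b q = true := by
  induction h with
  | refl => exact hp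
  | tail _ hadj ih => exact adjB_cell_right hadj

lemma reach_color {b : List (List Int)} {p q : Int × Int} (h : Reach b p q) :
    colorAt b p = colorAt b q := by
  induction h with
  | refl => rfl
  | tail _ hadj ih => exact ih.trans (adjB_color hadj)


-- ---------- the flood-fill worklist computes the reachable set ----------
lemma mem_addIf {g : Bool} {s : PySem.Set (Int × Int)} {p q : Int × Int} :
    q ∈ addIf g s p ↔ q ∈ s ∨ (g = true ∧ q = p) := by
  unfold addIf
  split_ifs with h <;> simp_all [PySem.Set.mem_add]

lemma nodup_addIf {g : Bool} {s : PySem.Set (Int × Int)} {p : Int × Int} (h : s.Nodup) :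
    (addIf g s p).Nodup := by
  unfold addIf
  split_ifs with hg
  · rw [PySem.Set.add_eq_ite]
    split_ifs with hm
    · exact h
    · simp [List.nodup_append, h]
      intro a c hab he
      exact hm (he ▸ hab)
  · exact h

lemma mem_ffStep {b : List (List Int)} {color : Int} {tc1 rest : PySem.Set (Int × Int)}
    {x y : Int} {q : Int × Int} :
    q ∈ ffStep b color tc1 rest x y ↔ q ∈ rest ∨
      ((x > 0 && ((rowAt b (x - 1)).length : Int) > y && colorAt b (x - 1, y) == color
          && !(PySem.Set.contains tc1 (x - 1, y))) = true ∧ q = (x - 1, y)) ∨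
      ((x < (b.length : Int) - 1 && ((rowAt b (x + 1)).length : Int) > y && colorAt b (x + 1, y) == color
          && !(PySem.Set.contains tc1 (x + 1, y))) = true ∧ q = (x + 1, y)) ∨
      ((y > 0 && colorAt b (x, y - 1) == color && !(PySem.Set.contains tc1 (x, y - 1))) = true ∧ q = (x, y - 1)) ∨
      ((y < ((rowAt b x).length : Int) - 1 && colorAt b (x, y + 1) == color && !(PySem.Set.contains tc1 (x, y + 1))) = true ∧ q = (x, y + 1)) := by
  unfold ffStep
  rw [mem_addIf, mem_addIf, mem_addIf, mem_addIf]
  tauto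

lemma isCell_parts {b : List (List Int)} {p : Int × Int} :
    isCell b p = true ↔ (0 ≤ p.1 ∧ p.1 < (b.length : Int) ∧ 0 ≤ p.2 ∧ p.2 < ((rowAt b p.1).length : Int)) := by
  simp [isCell, and_assoc]

lemma ffStep_nodup {b : List (List Int)} {color : Int} {tc1 rest : PySem.Set (Int × Int)}
    {x y : Int} (h : rest.Nodup) : (ffStep b color tc1 rest x y).Nodup :=
  nodup_addIf (nodup_addIf (nodup_addIf (nodup_addIf h)))

lemma ffStep_sound {b : List (List Int)} {color : Int} {tc1 rest : PySem.Set (Int × Int)}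
    {x y : Int} (hc : isCell b (x, y) = true) (hcol : colorAt b (x, y) = color) {q : Int × Int}
    (hq : q ∈ ffStep b color tc1 rest x y) :
    q ∈ rest ∨ (adjB b (x, y) q = true ∧ ¬ q ∈ tc1) := by
  have hcp := isCell_parts.mp hc
  simp only at hcp
  rcases mem_ffStep.mp hq with h | ⟨h, rfl⟩ | ⟨h, rfl⟩ | ⟨h, rfl⟩ | ⟨h, rfl⟩
  · exact Or.inl h
  all_goals right
  all_goals simp only [Bool.and_eq_true, decide_eq_true_eq, beq_iff_eq, Bool.not_eq_true'] at h
  all_goals constructor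
  · simp only [adjB, Bool.and_eq_true, Bool.or_eq_true, beq_iff_eq, decide_eq_true_eq]
    refine ⟨⟨⟨hc, isCell_parts.mpr (by simp only []; refine ⟨by omega, by omega, by omega, ?_⟩; simpa using h.1.1.2)⟩,
      hcol.trans h.1.2.symm⟩, by first | (simp; omega) | simp⟩
  · intro hmem
    have := (PySem.Set.contains_iff tc1 _).mpr hmem
    simp_all
  · simp only [adjB, Bool.and_eq_true, Bool.or_eq_true, beq_iff_eq, decide_eq_true_eq]
    refine ⟨⟨⟨hc, isCell_parts.mpr (by simp only []; refine ⟨by omega, by omega, by omega, ?_⟩; simpa using h.1.1.2)⟩,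
      hcol.trans h.1.2.symm⟩, by first | (simp; omega) | simp⟩
  · intro hmem
    have := (PySem.Set.contains_iff tc1 _).mpr hmem
    simp_all
  · simp only [adjB, Bool.and_eq_true, Bool.or_eq_true, beq_iff_eq, decide_eq_true_eq]
    refine ⟨⟨⟨hc, isCell_parts.mpr (by simp only []; refine ⟨by omega, by omega, by omega, by omega⟩)⟩,
      hcol.trans h.1.2.symm⟩, by first | (simp; omega) | simp⟩
  · intro hmem
    have := (PySem.Set.contains_iff tc1 _).mpr hmem
    simp_all
  · simp only [adjB, Bool.and_eq_true, Bool.or_eq_true, beq_iff_eq, decide_eq_true_eq]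
    refine ⟨⟨⟨hc, isCell_parts.mpr (by simp only []; refine ⟨by omega, by omega, by omega, by omega⟩)⟩,
      hcol.trans h.1.2.symm⟩, by first | (simp; omega) | simp⟩
  · intro hmem
    have := (PySem.Set.contains_iff tc1 _).mpr hmem
    simp_all

lemma ffStep_covers {b : List (List Int)} {color : Int} {tc1 rest : PySem.Set (Int × Int)}
    {x y : Int} (hcol : colorAt b (x, y) = color) {r : Int × Int}
    (hadj : adjB b (x, y) r = true) :
    r ∈ tc1 ∨ r ∈ ffStep b color tc1 rest x y := by
  by_cases hmem : r ∈ tc1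
  · exact Or.inl hmem
  right
  have hcontains : PySem.Set.contains tc1 r = false := by
    rw [← Bool.not_eq_true, PySem.Set.contains_iff]
    exact hmem
  simp only [adjB, Bool.and_eq_true, Bool.or_eq_true, beq_iff_eq, decide_eq_true_eq] at hadj
  obtain ⟨⟨⟨hcx, hcr⟩, hcolr⟩, hoff⟩ := hadj
  have hrp := isCell_parts.mp hcr
  have hxp := isCell_parts.mp hcx
  simp only at hxp
  rw [mem_ffStep]
  have hr4 : r = (x - 1, y) ∨ r = (x + 1, y) ∨ r = (x, y - 1) ∨ r = (x, y + 1) := by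
    rcases hoff with ⟨he, ho⟩ | ⟨he, ho⟩ <;> rcases ho with ho | ho
    · right; right; left; exact Prod.ext_iff.mpr ⟨by simp; omega, by simp; omega⟩
    · right; right; right; exact Prod.ext_iff.mpr ⟨by simp; omega, by simp; omega⟩
    · left; exact Prod.ext_iff.mpr ⟨by simp; omega, by simp; omega⟩
    · right; left; exact Prod.ext_iff.mpr ⟨by simp; omega, by simp; omega⟩
  rcases hr4 with rfl | rfl | rfl | rfl <;> simp only at hrp
  · right; left
    refine ⟨?_, rfl⟩
    simp only [Bool.and_eq_true, decide_eq_true_eq, beq_iff_eq, Bool.not_eq_true']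
    exact ⟨⟨⟨by omega, by omega⟩, hcolr.symm.trans hcol⟩, hcontains⟩
  · right; right; left
    refine ⟨?_, rfl⟩
    simp only [Bool.and_eq_true, decide_eq_true_eq, beq_iff_eq, Bool.not_eq_true']
    exact ⟨⟨⟨by omega, by omega⟩, hcolr.symm.trans hcol⟩, hcontains⟩
  · right; right; right; left
    refine ⟨?_, rfl⟩
    simp only [Bool.and_eq_true, decide_eq_true_eq, beq_iff_eq, Bool.not_eq_true']
    exact ⟨⟨by omega, hcolr.symm.trans hcol⟩, hcontains⟩
  · right; right; right; right
    refine ⟨?_, rfl⟩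
    simp only [Bool.and_eq_true, decide_eq_true_eq, beq_iff_eq, Bool.not_eq_true']
    exact ⟨⟨by omega, hcolr.symm.trans hcol⟩, hcontains⟩


lemma memAdd {s : PySem.Set (Int × Int)} {x q : Int × Int} :
    q ∈ PySem.Set.add s x ↔ q ∈ s ∨ q = x := by
  rw [PySem.Set.add_eq_ite]
  split_ifs with h
  · exact ⟨Or.inl, fun hq => hq.elim id (fun he => he ▸ h)⟩
  · simp [List.mem_append]

lemma not_contains_iff {s : PySem.Set (Int × Int)} {q : Int × Int} :
    (!PySem.Set.contains s q) = true ↔ q ∉ s := by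
  simp [PySem.Set.contains_iff]

lemma filter_length_lt {α : Type} {p q : α → Bool} {l : List α}
    (hpq : ∀ a ∈ l, q a = true → p a = true) {a : α}
    (ha : a ∈ l) (hpa : p a = true) (hqa : q a = false) :
    (l.filter q).length < (l.filter p).length := by
  induction l with
  | nil => cases ha
  | cons h t iht =>
    have hle : (t.filter q).length ≤ (t.filter p).length := by
      rw [← List.countP_eq_length_filter, ← List.countP_eq_length_filter]
      exact List.countP_mono_left (fun x hx hq => hpq x (List.mem_cons_of_mem h hx) hq)
    rcases List.mem_cons.mp ha with rfl | hat
    · simp only [List.filter_cons, hpa, hqa]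
      simpa using Nat.lt_succ_of_le hle
    · have hind := iht (fun x hx hq => hpq x (List.mem_cons_of_mem h hx) hq) hat
      simp only [List.filter_cons]
      by_cases hqh : q h = true
      · have hph := hpq h List.mem_cons_self hqh
        simp only [hqh, hph, if_true, List.length_cons]
        omega
      · rw [Bool.not_eq_true] at hqh
        by_cases hph : p h = true
        · simp only [hqh, hph, if_true, if_false, Bool.false_eq_true, List.length_cons]
          omega
        · rw [Bool.not_eq_true] at hph
          simp only [hqh, hph, if_false, Bool.false_eq_true]
          omega

lemma ffLoop_sound (b : List (List Int)) (color : Int) (s : Int × Int) :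
    ∀ (fuel : Nat) (tc tf : PySem.Set (Int × Int)),
    (∀ q ∈ tc, Reach b s q) →
    (∀ q ∈ tf, Reach b s q ∧ isCell b q = true ∧ colorAt b q = color) →
    ∀ q ∈ floodFillLoop b color fuel tc tf, Reach b s q := by
  intro fuel
  induction fuel with
  | zero =>
    intro tc tf h1 _ q hq
    exact h1 q (by simpa [floodFillLoop] using hq)
  | succ n ih =>
    intro tc tf h1 h2 q hq
    cases tf with
    | nil => exact h1 q (by simpa [floodFillLoop] using hq)
    | cons hd rest =>
      obtain ⟨x, y⟩ := hd
      simp only [floodFillLoop] at hq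
      obtain ⟨hr, hcell, hcol⟩ := h2 (x, y) List.mem_cons_self
      refine ih (PySem.Set.add tc (x, y)) _ ?_ ?_ q hq
      · intro q' hq'
        rcases memAdd.mp hq' with h | rfl
        · exact h1 q' h
        · exact hr
      · intro q' hq'
        rcases ffStep_sound hcell hcol hq' with h | ⟨hadj, _⟩
        · exact h2 q' (List.mem_cons_of_mem _ h)
        · exact ⟨hr.tail hadj, adjB_cell_right hadj, by rw [← adjB_color hadj]; exact hcol⟩

lemma ffLoop_complete (b : List (List Int)) (color : Int) :
    ∀ (fuel : Nat) (tc tf : PySem.Set (Int × Int)),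
    (∀ q ∈ tf, q ∉ tc) → tf.Nodup →
    (∀ q ∈ tf, isCell b q = true ∧ colorAt b q = color) →
    (∀ q ∈ tc, ∀ r, adjB b q r = true → r ∈ tc ∨ r ∈ tf) →
    ((cellList b).filter (fun q => !(PySem.Set.contains tc q))).length < fuel →
    (∀ q ∈ tc, q ∈ floodFillLoop b color fuel tc tf) ∧
    (∀ q ∈ tf, q ∈ floodFillLoop b color fuel tc tf) ∧
    (∀ q ∈ floodFillLoop b color fuel tc tf, ∀ r, adjB b q r = true →
        r ∈ floodFillLoop b color fuel tc tf) := by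
  intro fuel
  induction fuel with
  | zero => intro tc tf _ _ _ _ hf; omega
  | succ n ih =>
    intro tc tf hW hN hTf hCov hfuel
    cases tf with
    | nil =>
      simp only [floodFillLoop]
      refine ⟨fun q hq => hq, ?_, ?_⟩
      · intro q hq
        cases hq
      · intro q hq r hadj
        rcases hCov q hq r hadj with h | h
        · exact h
        · cases h
    | cons hd rest =>
      obtain ⟨x, y⟩ := hd
      simp only [floodFillLoop]
      obtain ⟨hcellxy, hcolxy⟩ := hTf (x, y) List.mem_cons_self
      have hxyn : (x, y) ∉ tc := hW _ List.mem_cons_self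
      have hNrest : rest.Nodup := (List.nodup_cons.mp hN).2
      have hxyrest : (x, y) ∉ rest := (List.nodup_cons.mp hN).1
      have hW1 : ∀ q ∈ ffStep b color (PySem.Set.add tc (x, y)) rest x y, q ∉ PySem.Set.add tc (x, y) := by
        intro q hq
        rcases ffStep_sound hcellxy hcolxy hq with h | ⟨_, hn⟩
        · intro hmem
          rcases memAdd.mp hmem with hm | rfl
          · exact hW q (List.mem_cons_of_mem _ h) hm
          · exact hxyrest h
        · exact hn
      have hTf1 : ∀ q ∈ ffStep b color (PySem.Set.add tc (x, y)) rest x y,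
          isCell b q = true ∧ colorAt b q = color := by
        intro q hq
        rcases ffStep_sound hcellxy hcolxy hq with h | ⟨hadj, _⟩
        · exact hTf q (List.mem_cons_of_mem _ h)
        · exact ⟨adjB_cell_right hadj, by rw [← adjB_color hadj]; exact hcolxy⟩
      have hCov1 : ∀ q ∈ PySem.Set.add tc (x, y), ∀ r, adjB b q r = true →
          r ∈ PySem.Set.add tc (x, y) ∨ r ∈ ffStep b color (PySem.Set.add tc (x, y)) rest x y := by
        intro q hq r hadj
        rcases memAdd.mp hq with hq | rfl
        · rcases hCov q hq r hadj with h | h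
          · exact Or.inl (memAdd.mpr (Or.inl h))
          · rcases List.mem_cons.mp h with rfl | h
            · exact Or.inl (memAdd.mpr (Or.inr rfl))
            · exact Or.inr (mem_ffStep.mpr (Or.inl h))
        · exact ffStep_covers hcolxy hadj
      have hfuel1 : ((cellList b).filter
          (fun q => !(PySem.Set.contains (PySem.Set.add tc (x, y)) q))).length < n := by
        have hstrict := filter_length_lt
          (p := fun q => !(PySem.Set.contains tc q))
          (q := fun q => !(PySem.Set.contains (PySem.Set.add tc (x, y)) q))
          (l := cellList b)
          (fun a _ hq => not_contains_iff.mpr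
            (fun hm => (not_contains_iff.mp hq) (memAdd.mpr (Or.inl hm))))
          (mem_cellList.mpr hcellxy)
          (not_contains_iff.mpr hxyn)
          (by
            rw [← Bool.not_eq_true, not_contains_iff]
            exact not_not_intro (memAdd.mpr (Or.inr rfl)))
        omega
      obtain ⟨ra, rb, rc⟩ := ih (PySem.Set.add tc (x, y))
        (ffStep b color (PySem.Set.add tc (x, y)) rest x y)
        hW1 (ffStep_nodup hNrest) hTf1 hCov1 hfuel1
      refine ⟨?_, ?_, rc⟩
      · intro q hq
        exact ra q (memAdd.mpr (Or.inl hq))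
      · intro q hq
        rcases List.mem_cons.mp hq with rfl | hq
        · exact ra _ (memAdd.mpr (Or.inr rfl))
        · exact rb q (mem_ffStep.mpr (Or.inl hq))


lemma floodFill_spec {b : List (List Int)} {x y : Int} (hs : isCell b (x, y) = true) :
    ∃ res : PySem.Set (Int × Int),
      floodFill b x y = (cellList b).filter (fun c => PySem.Set.contains res c) ∧
      (∀ q, q ∈ res ↔ Reach b (x, y) q) := by
  have hadd : PySem.Set.add PySem.Set.empty ((x : Int), (y : Int)) = [(x, y)] := by
    rw [PySem.Set.add_of_not_mem (by simp [PySem.Set.empty])]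
    rfl
  refine ⟨floodFillLoop b (colorAt b (x, y)) ((cellList b).length + 1)
      (PySem.Set.add PySem.Set.empty (x, y)) (PySem.Set.add PySem.Set.empty (x, y)), rfl, ?_⟩
  rw [hadd]
  have hstep : floodFillLoop b (colorAt b (x, y)) ((cellList b).length + 1) [(x, y)] [(x, y)] =
      floodFillLoop b (colorAt b (x, y)) ((cellList b).length)
        [(x, y)] (ffStep b (colorAt b (x, y)) [(x, y)] [] x y) := by
    simp only [floodFillLoop]
    congr 1
    · rw [PySem.Set.add_of_mem (List.mem_singleton.mpr rfl)]
    · rw [PySem.Set.add_of_mem (List.mem_singleton.mpr rfl)]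
  rw [hstep]
  have hsingle : ∀ q ∈ ([(x, y)] : List (Int × Int)), q ∉ ffStep b (colorAt b (x, y)) [(x, y)] [] x y →
      True := fun _ _ _ => trivial
  have hffsound : ∀ q ∈ ffStep b (colorAt b (x, y)) [(x, y)] [] x y,
      adjB b (x, y) q = true ∧ ¬ q ∈ ([(x, y)] : List (Int × Int)) := by
    intro q hq
    rcases ffStep_sound hs rfl hq with h | h
    · cases h
    · exact h
  obtain ⟨ra, rb, rc⟩ := ffLoop_complete b (colorAt b (x, y)) ((cellList b).length)
    [(x, y)] (ffStep b (colorAt b (x, y)) [(x, y)] [] x y)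
    (fun q hq => (hffsound q hq).2)
    (ffStep_nodup List.nodup_nil)
    (fun q hq => ⟨adjB_cell_right (hffsound q hq).1, (adjB_color (hffsound q hq).1).symm⟩)
    (fun q hq r hadj => by
      rcases List.mem_singleton.mp hq with rfl
      exact ffStep_covers rfl hadj)
    (by
      refine List.length_filter_lt_length_iff_exists.mpr ⟨(x, y), mem_cellList.mpr hs, ?_⟩
      rw [not_contains_iff]
      exact not_not_intro (List.mem_singleton.mpr rfl))
  intro q
  constructor
  · intro hq
    refine ffLoop_sound b (colorAt b (x, y)) (x, y) _ _ _ ?_ ?_ q hq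
    · intro q' hq'
      rcases List.mem_singleton.mp hq' with rfl
      exact Relation.ReflTransGen.refl
    · intro q' hq'
      have h := (hffsound q' hq').1
      exact ⟨Relation.ReflTransGen.single h, adjB_cell_right h, (adjB_color h).symm⟩
  · intro hq
    induction hq with
    | refl => exact ra (x, y) (List.mem_singleton.mpr rfl)
    | tail hst hadj ih => exact rc _ ih _ hadj


-- ---------- the relaxation pass, modelled on functions ----------
def tabD (b : List (List Int)) (g : (Int × Int) → (Int × Int)) : PySem.Dict (Int × Int) (Int × Int) :=
  PySem.Dict.mk ((cellList b).map (fun c => (c, g c)))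

lemma items_mk {κ ν : Type} [BEq κ] (xs : List (κ × ν)) : (PySem.Dict.mk xs).items = xs := rfl

lemma get?_mkmap {l : List (Int × Int)} {g : (Int × Int) → (Int × Int)} {d : Int × Int} :
    (PySem.Dict.mk (l.map (fun c => (c, g c)))).get? d = if d ∈ l then some (g d) else none := by
  induction l with
  | nil => rfl
  | cons c t ih =>
    rw [List.map_cons, PySem.Dict.get?_mk_cons]
    by_cases hcd : c = d
    · subst hcd
      simp
    · have : (c == d) = false := by simp [hcd]
      rw [this]
      simp only [Bool.false_eq_true, if_false, ih, List.mem_cons]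
      by_cases hdt : d ∈ t
      · simp [hdt]
      · simp [hdt, Ne.symm hcd]

lemma getD_tabD {b : List (List Int)} {g : (Int × Int) → (Int × Int)} {d : Int × Int} :
    (tabD b g).getD d d = (if isCell b d then g d else d) := by
  rw [PySem.Dict.getD_eq_get?_getD, tabD, get?_mkmap]
  by_cases h1 : d ∈ cellList b
  · rw [if_pos h1, if_pos (mem_cellList.mp h1)]
    rfl
  · rw [if_neg h1, if_neg (fun h => h1 (mem_cellList.mpr h))]
    rfl

lemma insert_mkmap {l : List (Int × Int)} {g : (Int × Int) → (Int × Int)} {c v : Int × Int}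
    (hc : c ∈ l) :
    (PySem.Dict.mk (l.map (fun a => (a, g a)))).insert c v =
      PySem.Dict.mk (l.map (fun a => (a, Function.update g c v a))) := by
  apply PySem.Dict.ext
  have hcont : (PySem.Dict.mk (l.map (fun a => (a, g a)))).contains c = true := by
    rw [PySem.Dict.contains_iff_mem_keys]
    simp only [PySem.Dict.keys, items_mk, List.map_map]
    exact List.mem_map.mpr ⟨c, hc, rfl⟩
  rw [PySem.Dict.items_insert_of_contains _ _ hcont, items_mk, items_mk, List.map_map]
  refine List.map_congr_left ?_
  intro a _
  by_cases hac : a = c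
  · subst hac
    show (if ((a, g a).1 == a) = true then (a, v) else (a, g a)) = (a, Function.update g a v a)
    simp [Function.update_self]
  · show (if ((a, g a).1 == c) = true then (c, v) else (a, g a)) = (a, Function.update g c v a)
    rw [if_neg (show ¬ ((a, g a).1 == c) = true by simp [hac])]
    rw [Function.update_of_ne hac]

def gDf (b : List (List Int)) (g : (Int × Int) → (Int × Int)) (d : Int × Int) : Int × Int :=
  if isCell b d then g d else d

def nbrList (c : Int × Int) : List (Int × Int) :=
  [(c.1 - 1, c.2), (c.1 + 1, c.2), (c.1, c.2 - 1), (c.1, c.2 + 1)]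

def pureRelax (b : List (List Int)) (g : (Int × Int) → (Int × Int)) (c : Int × Int) : Int × Int :=
  gDf b g ((nbrList c).foldl
    (fun m d => if isCell b d && colorAt b d == colorAt b c && cellLt (gDf b g d) m then gDf b g d else m)
    (g c))

def passGo (b : List (List Int)) :
    List (Int × Int) → ((Int × Int) → (Int × Int)) → Bool → (((Int × Int) → (Int × Int)) × Bool)
  | [], g, ch => (g, ch)
  | c :: S, g, ch =>
    if cellLt (pureRelax b g c) (g c) then passGo b S (Function.update g c (pureRelax b g c)) true
    else passGo b S g ch

lemma relaxCell_tab {b : List (List Int)} {g : (Int × Int) → (Int × Int)} {c : Int × Int}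
    (hc : isCell b c = true) :
    relaxCell b (tabD b g) c = pureRelax b g c := by
  unfold relaxCell pureRelax nbrList
  have hfun : (fun (m d : Int × Int) =>
      if isCell b d && colorAt b d == colorAt b c && cellLt ((tabD b g).getD d d) m
      then (tabD b g).getD d d else m) =
      (fun m d => if isCell b d && colorAt b d == colorAt b c && cellLt (gDf b g d) m
      then gDf b g d else m) := by
    funext m d
    rw [getD_tabD]
    rfl
  rw [hfun]
  have hinit : (tabD b g).getD c c = g c := by rw [getD_tabD]; simp [hc]
  rw [hinit]
  rw [getD_tabD]
  rfl

lemma relaxPass_tab (b : List (List Int)) :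
    ∀ (S : List (Int × Int)) (g : (Int × Int) → (Int × Int)) (ch : Bool),
    (∀ c ∈ S, c ∈ cellList b) →
    S.foldl (fun st c =>
      let m := relaxCell b st.1 c
      if cellLt m (st.1.getD c c) then (st.1.insert c m, true) else st) (tabD b g, ch) =
    (tabD b (passGo b S g ch).1, (passGo b S g ch).2) := by
  intro S
  induction S with
  | nil => intro g ch _; rfl
  | cons c S ih =>
    intro g ch hS
    have hc : c ∈ cellList b := hS c List.mem_cons_self
    have hcell : isCell b c = true := mem_cellList.mp hc
    rw [List.foldl_cons, passGo]
    simp only [relaxCell_tab hcell, getD_tabD, hcell, if_true]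
    by_cases hlt : cellLt (pureRelax b g c) (g c) = true
    · rw [if_pos hlt, if_pos hlt]
      have : (tabD b g).insert c (pureRelax b g c) =
          tabD b (Function.update g c (pureRelax b g c)) := insert_mkmap hc
      rw [this]
      exact ih _ true (fun a ha => hS a (List.mem_cons_of_mem _ ha))
    · rw [if_neg hlt, if_neg hlt]
      exact ih _ ch (fun a ha => hS a (List.mem_cons_of_mem _ ha))


-- ---------- invariants of the relaxation ----------
def GoodG (b : List (List Int)) (g : (Int × Int) → (Int × Int)) : Prop :=
  ∀ c, isCell b c = true → Reach b c (g c) ∧ cellLe (g c) c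

def relaxF (b : List (List Int)) (g : (Int × Int) → (Int × Int)) (c : Int × Int) :
    (Int × Int) → (Int × Int) → (Int × Int) :=
  fun m d => if isCell b d && colorAt b d == colorAt b c && cellLt (gDf b g d) m then gDf b g d else m

lemma pureRelax_eq (b : List (List Int)) (g : (Int × Int) → (Int × Int)) (c : Int × Int) :
    pureRelax b g c = gDf b g ((nbrList c).foldl (relaxF b g c) (g c)) := rfl

lemma cellLt_of_lt_of_le {p q r : Int × Int} (h1 : cellLt p q = true) (h2 : cellLe q r) :
    cellLt p r = true := by
  rcases h2 with h2 | rfl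
  · exact cellLt_trans h1 h2
  · exact h1

lemma mem_nbrList {c d : Int × Int} :
    d ∈ nbrList c ↔ d = (c.1 - 1, c.2) ∨ d = (c.1 + 1, c.2) ∨ d = (c.1, c.2 - 1) ∨ d = (c.1, c.2 + 1) := by
  simp [nbrList]

lemma nbr_adj {b : List (List Int)} {c d : Int × Int} (hc : isCell b c = true)
    (hd : d ∈ nbrList c) (hcell : isCell b d = true) (hcol : colorAt b d = colorAt b c) :
    adjB b c d = true := by
  simp only [adjB, Bool.and_eq_true, Bool.or_eq_true, beq_iff_eq]
  refine ⟨⟨⟨hc, hcell⟩, hcol.symm⟩, ?_⟩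
  obtain ⟨c1, c2⟩ := c
  obtain ⟨d1, d2⟩ := d
  rcases mem_nbrList.mp hd with h | h | h | h <;>
    (rw [Prod.ext_iff] at h; simp only at h ⊢; omega)

lemma adj_mem_nbrList {b : List (List Int)} {c d : Int × Int} (h : adjB b c d = true) :
    d ∈ nbrList c := by
  rw [mem_nbrList]
  simp only [adjB, Bool.and_eq_true, Bool.or_eq_true, beq_iff_eq] at h
  obtain ⟨_, hoff⟩ := h
  obtain ⟨c1, c2⟩ := c
  obtain ⟨d1, d2⟩ := d
  simp only [Prod.ext_iff]
  try simp only at hoff ⊢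
  omega

lemma adj_guard {b : List (List Int)} {c d : Int × Int} (h : adjB b c d = true) :
    (isCell b d && colorAt b d == colorAt b c) = true := by
  simp only [adjB, Bool.and_eq_true, Bool.or_eq_true, beq_iff_eq] at h
  simp only [Bool.and_eq_true, beq_iff_eq]
  exact ⟨h.1.1.2, h.1.2.symm⟩

lemma reach_single {b : List (List Int)} {p q : Int × Int} (h : adjB b p q = true) :
    Reach b p q := Relation.ReflTransGen.single h

lemma foldMin_spec {b : List (List Int)} {g : (Int × Int) → (Int × Int)} {c : Int × Int}
    (hg : GoodG b g) (hc : isCell b c = true) :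
    ∀ (l : List (Int × Int)), (∀ d ∈ l, d ∈ nbrList c) →
    ∀ init, Reach b c init → cellLe init (g c) →
      (Reach b c (l.foldl (relaxF b g c) init) ∧ cellLe (l.foldl (relaxF b g c) init) (g c)) ∧
      cellLe (l.foldl (relaxF b g c) init) init ∧
      (∀ d ∈ l, (isCell b d && colorAt b d == colorAt b c) = true →
        cellLe (l.foldl (relaxF b g c) init) (gDf b g d)) := by
  intro l
  induction l with
  | nil =>
    intro _ init h1 h2
    exact ⟨⟨h1, h2⟩, cellLe_refl _, fun d hd => absurd hd (List.not_mem_nil)⟩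
  | cons d t ih =>
    intro hl init h1 h2
    rw [List.foldl_cons]
    by_cases hguard : (isCell b d && colorAt b d == colorAt b c && cellLt (gDf b g d) init) = true
    · have hstep : relaxF b g c init d = gDf b g d := by
        unfold relaxF
        rw [if_pos hguard]
      simp only [Bool.and_eq_true, beq_iff_eq] at hguard
      obtain ⟨⟨hcelld, hcold⟩, hltd⟩ := hguard
      have hadj : adjB b c d = true := nbr_adj hc (hl d List.mem_cons_self) hcelld hcold
      have hgd : gDf b g d = g d := by unfold gDf; rw [if_pos hcelld]
      have hreach : Reach b c (gDf b g d) := by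
        rw [hgd]
        exact Relation.ReflTransGen.trans (reach_single hadj) (hg d hcelld).1
      have hle : cellLe (gDf b g d) (g c) := Or.inl (cellLt_of_lt_of_le hltd h2)
      obtain ⟨⟨r1, r2⟩, r3, r4⟩ := ih (fun a ha => hl a (List.mem_cons_of_mem _ ha)) _ hreach hle
      rw [hstep]
      refine ⟨⟨r1, r2⟩, cellLe_trans r3 (Or.inl (cellLt_of_lt_of_le hltd (cellLe_refl _))), ?_⟩
      intro e he hge
      rcases List.mem_cons.mp he with rfl | he
      · exact r3
      · exact r4 e he hge
    · have hstep : relaxF b g c init d = init := by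
        unfold relaxF
        rw [if_neg hguard]
      obtain ⟨⟨r1, r2⟩, r3, r4⟩ := ih (fun a ha => hl a (List.mem_cons_of_mem _ ha)) init h1 h2
      rw [hstep]
      refine ⟨⟨r1, r2⟩, r3, ?_⟩
      intro e he hge
      rcases List.mem_cons.mp he with rfl | he
      · have hnlt : ¬ cellLt (gDf b g e) init = true := by
          intro hlt
          exact hguard (by simp only [Bool.and_eq_true] at hge ⊢; exact ⟨hge, hlt⟩)
        exact cellLe_trans r3 (cellLe_of_not_lt hnlt)
      · exact r4 e he hge

lemma pureRelax_spec {b : List (List Int)} {g : (Int × Int) → (Int × Int)} {c : Int × Int}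
    (hg : GoodG b g) (hc : isCell b c = true) :
    Reach b c (pureRelax b g c) ∧ cellLe (pureRelax b g c) (g c) := by
  obtain ⟨⟨r1, r2⟩, _, _⟩ := foldMin_spec hg hc (nbrList c) (fun d hd => hd) (g c)
    (hg c hc).1 (cellLe_refl _)
  rw [pureRelax_eq]
  have hcellm : isCell b ((nbrList c).foldl (relaxF b g c) (g c)) = true := reach_cell hc r1
  have hgd : gDf b g ((nbrList c).foldl (relaxF b g c) (g c)) =
      g ((nbrList c).foldl (relaxF b g c) (g c)) := by unfold gDf; rw [if_pos hcellm]
  rw [hgd]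
  exact ⟨r1.trans (hg _ hcellm).1, cellLe_trans (hg _ hcellm).2 r2⟩

lemma passGo_snd_true (b : List (List Int)) :
    ∀ (S : List (Int × Int)) (g : (Int × Int) → (Int × Int)), (passGo b S g true).2 = true := by
  intro S
  induction S with
  | nil => intro g; rfl
  | cons c S ih =>
    intro g
    rw [passGo]
    split_ifs <;> exact ih _

lemma passGo_untouched (b : List (List Int)) :
    ∀ (S : List (Int × Int)) (g : (Int × Int) → (Int × Int)) (ch : Bool) (d : Int × Int),
    d ∉ S → (passGo b S g ch).1 d = g d := by
  intro S
  induction S with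
  | nil => intro g ch d _; rfl
  | cons c S ih =>
    intro g ch d hd
    rw [passGo]
    have hdc : d ≠ c := fun he => hd (he ▸ List.mem_cons_self)
    have hdS : d ∉ S := fun he => hd (List.mem_cons_of_mem _ he)
    split_ifs with hlt
    · rw [ih _ _ _ hdS, Function.update_of_ne hdc]
    · exact ih _ _ _ hdS

lemma passGo_le (b : List (List Int)) :
    ∀ (S : List (Int × Int)) (g : (Int × Int) → (Int × Int)) (ch : Bool) (d : Int × Int),
    cellLe ((passGo b S g ch).1 d) (g d) := by
  intro S
  induction S with
  | nil => intro g ch d; exact cellLe_refl _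
  | cons c S ih =>
    intro g ch d
    rw [passGo]
    split_ifs with hlt
    · refine cellLe_trans (ih _ true d) ?_
      by_cases hdc : d = c
      · subst hdc
        rw [Function.update_self]
        exact Or.inl hlt
      · rw [Function.update_of_ne hdc]
        exact cellLe_refl _
    · exact ih _ ch d

lemma passGo_good (b : List (List Int)) :
    ∀ (S : List (Int × Int)) (g : (Int × Int) → (Int × Int)) (ch : Bool),
    GoodG b g → GoodG b (passGo b S g ch).1 := by
  intro S
  induction S with
  | nil => intro g ch hg; exact hg
  | cons c S ih =>
    intro g ch hg
    rw [passGo]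
    split_ifs with hlt
    · refine ih _ true ?_
      intro e hcelle
      by_cases hec : e = c
      · subst hec
        have hcellc := hcelle
        rw [Function.update_self]
        obtain ⟨r1, r2⟩ := pureRelax_spec hg hcellc
        exact ⟨r1, cellLe_trans r2 (hg e hcelle).2⟩
      · rw [Function.update_of_ne hec]
        exact hg e hcelle
    · exact ih _ ch hg

lemma passGo_nochange (b : List (List Int)) :
    ∀ (S : List (Int × Int)) (g : (Int × Int) → (Int × Int)),
    (passGo b S g false).2 = false →
    (passGo b S g false).1 = g ∧ ∀ c ∈ S, ¬ cellLt (pureRelax b g c) (g c) = true := by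
  intro S
  induction S with
  | nil => intro g _; exact ⟨rfl, fun c hc => absurd hc (List.not_mem_nil)⟩
  | cons c S ih =>
    intro g hch
    rw [passGo] at hch ⊢
    split_ifs at hch ⊢ with hlt
    · rw [passGo_snd_true] at hch
      cases hch
    · obtain ⟨h1, h2⟩ := ih g hch
      refine ⟨h1, ?_⟩
      intro e he
      rcases List.mem_cons.mp he with rfl | he
      · exact hlt
      · exact h2 e he

lemma passGo_strict (b : List (List Int)) :
    ∀ (S : List (Int × Int)) (g : (Int × Int) → (Int × Int)),
    S.Nodup → (passGo b S g false).2 = true →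
    ∃ c ∈ S, cellLt ((passGo b S g false).1 c) (g c) = true := by
  intro S
  induction S with
  | nil => intro g _ hch; cases hch
  | cons c S ih =>
    intro g hN hch
    rw [passGo] at hch ⊢
    have hcS : c ∉ S := (List.nodup_cons.mp hN).1
    split_ifs at hch ⊢ with hlt
    · refine ⟨c, List.mem_cons_self, ?_⟩
      rw [passGo_untouched b S _ true c hcS, Function.update_self]
      exact hlt
    · obtain ⟨e, he, hlt'⟩ := ih g (List.nodup_cons.mp hN).2 hch
      exact ⟨e, List.mem_cons_of_mem _ he, hlt'⟩


-- ---------- termination of the relaxation ----------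
def rankC (b : List (List Int)) (p : Int × Int) : Nat :=
  ((cellList b).filter (fun q => cellLt q p)).length

def phiG (b : List (List Int)) (g : (Int × Int) → (Int × Int)) : Nat :=
  ((cellList b).map (fun c => rankC b (g c))).sum

lemma rankC_mono {b : List (List Int)} {p' p : Int × Int} (h : cellLe p' p) :
    rankC b p' ≤ rankC b p := by
  unfold rankC
  rw [← List.countP_eq_length_filter, ← List.countP_eq_length_filter]
  exact List.countP_mono_left (fun q _ hq => cellLt_of_lt_of_le hq h)

lemma rankC_strict {b : List (List Int)} {p' p : Int × Int} (hp' : isCell b p' = true)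
    (h : cellLt p' p = true) : rankC b p' < rankC b p :=
  filter_length_lt (p := fun q => cellLt q p) (q := fun q => cellLt q p')
    (fun a _ ha => cellLt_trans ha h) (mem_cellList.mpr hp') h
    (by rw [← Bool.not_eq_true]; exact cellLt_irrefl p')

lemma phiG_lt {b : List (List Int)} {g g' : (Int × Int) → (Int × Int)}
    (hle : ∀ c, cellLe (g' c) (g c))
    (hex : ∃ c ∈ cellList b, cellLt (g' c) (g c) = true)
    (hcell : ∀ c, isCell b c = true → isCell b (g' c) = true) :
    phiG b g' < phiG b g := by
  unfold phiG
  refine List.sum_lt_sum _ _ (fun c _ => rankC_mono (hle c)) ?_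
  obtain ⟨c, hc, hlt⟩ := hex
  exact ⟨c, hc, rankC_strict (hcell c (mem_cellList.mp hc)) hlt⟩

lemma phiG_le (b : List (List Int)) (g : (Int × Int) → (Int × Int)) :
    phiG b g ≤ (cellList b).length * (cellList b).length := by
  unfold phiG
  have h := List.sum_le_card_nsmul ((cellList b).map (fun c => rankC b (g c)))
    ((cellList b).length) ?_
  · simpa [smul_eq_mul] using h
  · intro x hx
    obtain ⟨c, _, rfl⟩ := List.mem_map.mp hx
    exact List.length_filter_le _ _

lemma relaxLoop_spec (b : List (List Int)) :
    ∀ (fuel : Nat) (g : (Int × Int) → (Int × Int)), GoodG b g → phiG b g < fuel →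
    ∃ g', relaxLoop b fuel (tabD b g) = tabD b g' ∧ GoodG b g' ∧
      ∀ c ∈ cellList b, ¬ cellLt (pureRelax b g' c) (g' c) = true := by
  intro fuel
  induction fuel with
  | zero => intro g _ h; omega
  | succ n ih =>
    intro g hg hphi
    have hpass := relaxPass_tab b (cellList b) g false (fun c hc => hc)
    simp only [relaxLoop, relaxPass, hpass]
    by_cases hch : (passGo b (cellList b) g false).2 = true
    · rw [if_pos hch]
      have hGood := passGo_good b (cellList b) g false hg
      have hphi' : phiG b (passGo b (cellList b) g false).1 < n := by
        have hlt := phiG_lt (b := b) (passGo_le b (cellList b) g false)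
          (passGo_strict b (cellList b) g (nodup_cellList b) hch)
          (fun c hc => reach_cell hc (hGood c hc).1)
        omega
      exact ih _ hGood hphi'
    · rw [if_neg hch]
      rw [Bool.not_eq_true] at hch
      obtain ⟨h1, h2⟩ := passGo_nochange b (cellList b) g hch
      exact ⟨g, by rw [h1], hg, h2⟩

-- ---------- stability at the fixpoint ----------
def StabG (b : List (List Int)) (g : (Int × Int) → (Int × Int)) : Prop :=
  ∀ c d, isCell b c = true → adjB b c d = true → cellLe (g c) (g d)

lemma stab_of_noupdate {b : List (List Int)} {g : (Int × Int) → (Int × Int)} (hg : GoodG b g)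
    (hnc : ∀ c ∈ cellList b, ¬ cellLt (pureRelax b g c) (g c) = true) : StabG b g := by
  intro c d hc hadj
  obtain ⟨⟨r1, _⟩, _, r4⟩ := foldMin_spec hg hc (nbrList c) (fun e he => he) (g c)
    (hg c hc).1 (cellLe_refl _)
  have hcand : cellLe ((nbrList c).foldl (relaxF b g c) (g c)) (gDf b g d) :=
    r4 d (adj_mem_nbrList hadj) (adj_guard hadj)
  have hcelld : isCell b d = true := adjB_cell_right hadj
  have hgd : gDf b g d = g d := by unfold gDf; rw [if_pos hcelld]
  have hcellm : isCell b ((nbrList c).foldl (relaxF b g c) (g c)) = true := reach_cell hc r1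
  have hpr : pureRelax b g c = g ((nbrList c).foldl (relaxF b g c) (g c)) := by
    rw [pureRelax_eq]
    unfold gDf
    rw [if_pos hcellm]
  have hge : cellLe (g c) (pureRelax b g c) :=
    cellLe_of_not_lt (hnc c (mem_cellList.mpr hc))
  refine cellLe_trans hge ?_
  rw [hpr, ← hgd]
  exact cellLe_trans (hg _ hcellm).2 hcand

lemma label_const {b : List (List Int)} {g : (Int × Int) → (Int × Int)} (hg : GoodG b g)
    (hs : StabG b g) : ∀ {c d}, isCell b c = true → Reach b c d → g c = g d := by
  intro c d hc hr
  induction hr with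
  | refl => rfl
  | @tail e f hst hadj ih =>
    have hcellm := reach_cell hc hst
    have h1 := hs e f hcellm hadj
    have h2 := hs f e (adjB_cell_right hadj) (adjB_symm hadj)
    exact ih.trans (cellLe_antisymm h1 h2)

lemma label_eq_iff {b : List (List Int)} {g : (Int × Int) → (Int × Int)} (hg : GoodG b g)
    (hs : StabG b g) {c d : Int × Int} (hc : isCell b c = true) (hd : isCell b d = true) :
    g c = g d ↔ Reach b c d := by
  constructor
  · intro he
    exact (hg c hc).1.trans (he ▸ (reach_symm (hg d hd).1))
  · exact label_const hg hs hc

lemma label_cell {b : List (List Int)} {g : (Int × Int) → (Int × Int)} (hg : GoodG b g)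
    {c : Int × Int} (hc : isCell b c = true) : isCell b (g c) = true :=
  reach_cell hc (hg c hc).1

lemma label_idem {b : List (List Int)} {g : (Int × Int) → (Int × Int)} (hg : GoodG b g)
    (hs : StabG b g) {c : Int × Int} (hc : isCell b c = true) : g (g c) = g c :=
  (label_const hg hs hc (hg c hc).1).symm


-- ---------- common description of the output ----------
lemma boolExt {a b : Bool} (h : a = true ↔ b = true) : a = b := by
  cases a <;> cases b <;> simp_all

lemma memUpdate {s : PySem.Set (Int × Int)} {xs : List (Int × Int)} {q : Int × Int} :
    q ∈ PySem.Set.update s xs ↔ q ∈ s ∨ q ∈ xs := by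
  unfold PySem.Set.update
  induction xs generalizing s with
  | nil => simp
  | cons x t ih =>
    rw [List.foldl_cons, ih]
    rw [memAdd]
    simp [List.mem_cons]
    tauto

def compOf (b : List (List Int)) (g : (Int × Int) → (Int × Int)) (r : Int × Int) :
    List (Int × Int) := (cellList b).filter (fun d => g d == r)

def emitP (b : List (List Int)) (g : (Int × Int) → (Int × Int)) (c : Int × Int) : Bool :=
  !(colorAt b c == 0) && (g c == c) && decide (1 < (compOf b g c).length)

def entryOf (b : List (List Int)) (g : (Int × Int) → (Int × Int)) (c : Int × Int) :
    Int × Int × Int × List (Int × Int) :=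
  (c.1, c.2, ((compOf b g c).length : Int), compOf b g c)

def entriesOf (b : List (List Int)) (g : (Int × Int) → (Int × Int)) (P : List (Int × Int)) :
    List (Int × Int × Int × List (Int × Int)) :=
  (P.filter (emitP b g)).map (entryOf b g)

def stepA (b : List (List Int))
    (st : PySem.Set (Int × Int) × List (Int × Int × Int × List (Int × Int))) (c : Int × Int) :
    PySem.Set (Int × Int) × List (Int × Int × Int × List (Int × Int)) :=
  if !(colorAt b c == 0) && !(PySem.Set.contains st.1 c) then
    let area := floodFill b c.1 c.2
    let inArea := PySem.Set.update st.1 area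
    if 1 < area.length then (inArea, st.2 ++ [(c.1, c.2, (area.length : Int), area)])
    else (inArea, st.2)
  else st

lemma findAreas_eq_foldCells (b : List (List Int)) :
    findAreas b = ((cellList b).foldl (stepA b) (PySem.Set.empty, [])).2 := by
  have h : ∀ init, (cellList b).foldl (stepA b) init =
      (List.range b.length).foldl (fun st x =>
        (List.range (b.getD x []).length).foldl
          (fun st y => stepA b st (Int.ofNat x, Int.ofNat y)) st) init := by
    intro init
    rw [cellList, List.foldl_flatMap]
    have hfun : (fun (acc : PySem.Set (Int × Int) × List (Int × Int × Int × List (Int × Int))) (x : Nat) =>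
        ((List.range (b.getD x []).length).map (fun y => (Int.ofNat x, Int.ofNat y))).foldl (stepA b) acc) =
        (fun acc x => (List.range (b.getD x []).length).foldl
          (fun st y => stepA b st (Int.ofNat x, Int.ofNat y)) acc) := by
      funext acc x
      rw [List.foldl_map]
    rw [hfun]
  rw [h]
  unfold findAreas stepA
  rfl

lemma prefix_lt {b : List (List Int)} {P S : List (Int × Int)} {c : Int × Int}
    (hdec : cellList b = P ++ c :: S) : ∀ p ∈ P, cellLt p c = true := by
  intro p hp
  have hpw := pairwise_cellList b
  rw [hdec, List.pairwise_append] at hpw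
  exact hpw.2.2 p hp c List.mem_cons_self

lemma notmem_prefix {b : List (List Int)} {P S : List (Int × Int)} {c : Int × Int}
    (hdec : cellList b = P ++ c :: S) : c ∉ P := by
  intro hc
  exact cellLt_irrefl c (prefix_lt hdec c hc)

-- at a scan cell c that is not yet covered, c is its component's minimum
lemma root_of_uncovered {b : List (List Int)} {g : (Int × Int) → (Int × Int)} (hg : GoodG b g)
    (hs : StabG b g) {P S : List (Int × Int)} {c : Int × Int}
    (hdec : cellList b = P ++ c :: S)
    (hnc : ¬ ∃ p ∈ P, colorAt b p ≠ 0 ∧ g p = g c) (htr : colorAt b c ≠ 0) : g c = c := by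
  have hcellc : isCell b c = true := mem_cellList.mp (by rw [hdec]; simp)
  by_contra hne
  have hlt : cellLt (g c) c = true := cellLt_of_le_of_ne (hg c hcellc).2 hne
  have hcellm : isCell b (g c) = true := label_cell hg hcellc
  have hmP : g c ∈ P := mem_prefix_of_lt hdec (mem_cellList.mpr hcellm) hlt
  refine hnc ⟨g c, hmP, ?_, label_idem hg hs hcellc⟩
  rw [← reach_color (hg c hcellc).1]
  exact htr

lemma covered_not_root {b : List (List Int)} {g : (Int × Int) → (Int × Int)} (hg : GoodG b g)
    {P S : List (Int × Int)} {c : Int × Int} (hdec : cellList b = P ++ c :: S)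
    {p : Int × Int} (hp : p ∈ P) (hgp : g p = g c) : ¬ g c = c := by
  intro hroot
  have hcellp : isCell b p = true := mem_cellList.mp (by rw [hdec]; simp [hp])
  have hle : cellLe c p := by
    rw [← hroot, ← hgp]
    exact (hg p hcellp).2
  exact cellLt_irrefl c (cellLe_of_lt_trans hle (prefix_lt hdec p hp))

lemma area_eq_compOf {b : List (List Int)} {g : (Int × Int) → (Int × Int)} (hg : GoodG b g)
    (hs : StabG b g) {c : Int × Int} (hcellc : isCell b c = true) (hroot : g c = c) :
    floodFill b c.1 c.2 = compOf b g c ∧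
    (∀ q, q ∈ floodFill b c.1 c.2 ↔ (isCell b q = true ∧ g q = c)) := by
  have hcellc' : isCell b (c.1, c.2) = true := hcellc
  obtain ⟨res, heq, hmem⟩ := floodFill_spec hcellc'
  have hreach : ∀ q, Reach b c q ↔ (isCell b q = true ∧ g q = c) := by
    intro q
    constructor
    · intro hr
      have hq : isCell b q = true := reach_cell hcellc hr
      refine ⟨hq, ?_⟩
      rw [← (label_eq_iff hg hs hcellc hq).mpr hr, hroot]
    · intro ⟨hq, hgq⟩
      refine (label_eq_iff hg hs hcellc hq).mp ?_
      rw [hroot, hgq]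
  have hff : floodFill b c.1 c.2 = compOf b g c := by
    rw [heq]
    unfold compOf
    refine List.filter_congr ?_
    intro d hd
    refine boolExt ?_
    rw [PySem.Set.contains_iff, hmem, beq_iff_eq]
    have := hreach d
    rw [show Reach b (c.1, c.2) d ↔ Reach b c d from Iff.rfl] at this
    rw [this]
    simp [mem_cellList.mp hd]
  refine ⟨hff, ?_⟩
  intro q
  rw [hff]
  unfold compOf
  rw [List.mem_filter, beq_iff_eq, mem_cellList]

lemma scanA {b : List (List Int)} {g : (Int × Int) → (Int × Int)} (hg : GoodG b g)
    (hs : StabG b g) :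
    ∀ (S P : List (Int × Int)) (inA : PySem.Set (Int × Int))
      (ents : List (Int × Int × Int × List (Int × Int))),
    cellList b = P ++ S →
    (∀ q, PySem.Set.contains inA q = true ↔
      (isCell b q = true ∧ ∃ p ∈ P, colorAt b p ≠ 0 ∧ g p = g q)) →
    (S.foldl (stepA b) (inA, ents)).2 = ents ++ entriesOf b g S := by
  intro S
  induction S with
  | nil =>
    intro P inA ents _ _
    simp [entriesOf]
  | cons c S ih =>
    intro P inA ents hdec hinv
    have hcellc : isCell b c = true := mem_cellList.mp (by rw [hdec]; simp)
    have hdec' : cellList b = (P ++ [c]) ++ S := by rw [hdec]; simp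
    rw [List.foldl_cons]
    by_cases htr : colorAt b c = 0
    · have hcond : (!(colorAt b c == 0) && !(PySem.Set.contains inA c)) = false := by
        simp [htr]
      have hstep : stepA b (inA, ents) c = (inA, ents) := by
        unfold stepA
        rw [hcond]
        simp
      rw [hstep, ih (P ++ [c]) inA ents hdec' ?_]
      · have hemit : emitP b g c = false := by simp [emitP, htr]
        unfold entriesOf
        rw [List.filter_cons, hemit]
        simp
      · intro q
        rw [hinv q]
        constructor
        · rintro ⟨h1, p, hp, h3⟩
          exact ⟨h1, p, by simp [hp], h3⟩
        · rintro ⟨h1, p, hp, h2, h3⟩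
          rcases List.mem_append.mp hp with hp | hp
          · exact ⟨h1, p, hp, h2, h3⟩
          · rcases List.mem_singleton.mp hp with rfl
            exact absurd htr h2
    · by_cases hcov : PySem.Set.contains inA c = true
      · have hmemc : c ∈ inA := (PySem.Set.contains_iff inA c).mp hcov
        have hcond : (!(colorAt b c == 0) && !(PySem.Set.contains inA c)) = false := by
          simp [hmemc]
        have hstep : stepA b (inA, ents) c = (inA, ents) := by
          unfold stepA
          rw [hcond]
          simp
        obtain ⟨_, p0, hp0, htr0, hgp0⟩ := (hinv c).mp hcov
        rw [hstep, ih (P ++ [c]) inA ents hdec' ?_]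
        · have hemit : emitP b g c = false := by
            have := covered_not_root hg hdec hp0 hgp0
            simp [emitP, this]
          unfold entriesOf
          rw [List.filter_cons, hemit]
          simp
        · intro q
          rw [hinv q]
          constructor
          · rintro ⟨h1, p, hp, h3⟩
            exact ⟨h1, p, by simp [hp], h3⟩
          · rintro ⟨h1, p, hp, h2, h3⟩
            rcases List.mem_append.mp hp with hp | hp
            · exact ⟨h1, p, hp, h2, h3⟩
            · rcases List.mem_singleton.mp hp with rfl
              exact ⟨h1, p0, hp0, htr0, hgp0.trans h3⟩
      · -- fresh component: emit if it has more than one cell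
        have hroot : g c = c := by
          refine root_of_uncovered hg hs hdec ?_ htr
          intro ⟨p, hp, h2, h3⟩
          exact hcov ((hinv c).mpr ⟨hcellc, p, hp, h2, h3⟩)
        obtain ⟨hff, hffmem⟩ := area_eq_compOf hg hs hcellc hroot
        have hnmemc : c ∉ inA := fun hm => hcov ((PySem.Set.contains_iff inA c).mpr hm)
        have hcond : (!(colorAt b c == 0) && !(PySem.Set.contains inA c)) = true := by
          simp [htr, hnmemc]
        have hinv' : ∀ q, PySem.Set.contains (PySem.Set.update inA (floodFill b c.1 c.2)) q = true ↔
            (isCell b q = true ∧ ∃ p ∈ P ++ [c], colorAt b p ≠ 0 ∧ g p = g q) := by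
          intro q
          rw [PySem.Set.contains_iff, memUpdate, ← PySem.Set.contains_iff, hinv q]
          constructor
          · rintro (⟨h1, p, hp, h2, h3⟩ | hq)
            · exact ⟨h1, p, by simp [hp], h2, h3⟩
            · obtain ⟨hq1, hq2⟩ := (hffmem q).mp hq
              exact ⟨hq1, c, by simp, htr, by rw [hroot, hq2]⟩
          · rintro ⟨h1, p, hp, h2, h3⟩
            rcases List.mem_append.mp hp with hp | hp
            · exact Or.inl ⟨h1, p, hp, h2, h3⟩
            · rcases List.mem_singleton.mp hp with rfl
              refine Or.inr ((hffmem q).mpr ⟨h1, ?_⟩)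
              rw [← h3, hroot]
        by_cases hsize : 1 < (floodFill b c.1 c.2).length
        · have hstep : stepA b (inA, ents) c =
              (PySem.Set.update inA (floodFill b c.1 c.2),
               ents ++ [(c.1, c.2, ((floodFill b c.1 c.2).length : Int), floodFill b c.1 c.2)]) := by
            unfold stepA
            rw [hcond]
            simp [hsize]
          rw [hstep, ih (P ++ [c]) _ _ hdec' hinv']
          have hemit : emitP b g c = true := by
            have hsz : 1 < (compOf b g c).length := by rw [← hff]; exact hsize
            simp [emitP, htr, hroot, hsz]
          unfold entriesOf
          rw [List.filter_cons, hemit]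
          simp only [if_true, List.map_cons]
          unfold entryOf
          rw [← hff]
          simp
        · have hstep : stepA b (inA, ents) c =
              (PySem.Set.update inA (floodFill b c.1 c.2), ents) := by
            unfold stepA
            rw [hcond]
            simp [hsize]
          rw [hstep, ih (P ++ [c]) _ _ hdec' hinv']
          have hemit : emitP b g c = false := by
            have hsz : ¬ 1 < (compOf b g c).length := by rw [← hff]; exact hsize
            simp [emitP, hsz]
          unfold entriesOf
          rw [List.filter_cons, hemit]
          simp


-- ---------- the grouping pass of B ----------
def groupsOf (b : List (List Int)) (g : (Int × Int) → (Int × Int)) (P : List (Int × Int)) :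
    List ((Int × Int) × PySem.Set (Int × Int)) :=
  (P.filter (fun c => g c == c)).map (fun r => (r, P.filter (fun c => g c == r)))

lemma label0_eq (b : List (List Int)) :
    (cellList b).foldl (fun d c => d.insert c c) PySem.Dict.empty = tabD b id := by
  apply PySem.Dict.ext
  have h := PySem.Dict.items_foldl_insert_fresh (cellList b) (fun a => a) (fun a => a)
    PySem.Dict.empty (fun a _ => by simp) (by simpa using nodup_cellList b)
  simpa [tabD, items_mk] using h

lemma keys_groupsOf (b : List (List Int)) (g : (Int × Int) → (Int × Int)) (P : List (Int × Int)) :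
    (PySem.Dict.mk (groupsOf b g P)).keys = P.filter (fun c => g c == c) := by
  show (groupsOf b g P).map (fun p => p.1) = _
  rw [groupsOf, List.map_map]
  exact List.map_id _

lemma groupScan {b : List (List Int)} {g : (Int × Int) → (Int × Int)} (hg : GoodG b g)
    (hs : StabG b g) :
    ∀ (S P : List (Int × Int)),
    cellList b = P ++ S →
    S.foldl (fun d c =>
        let r := (tabD b g).getD c c
        d.insert r (PySem.Set.add (d.getD r PySem.Set.empty) c))
      (PySem.Dict.mk (groupsOf b g P))
    = PySem.Dict.mk (groupsOf b g (P ++ S)) := by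
  intro S
  induction S with
  | nil => intro P _; simp
  | cons c S ih =>
    intro P hdec
    have hcellc : isCell b c = true := mem_cellList.mp (by rw [hdec]; simp)
    have hdec' : cellList b = (P ++ [c]) ++ S := by rw [hdec]; simp
    have hcP : c ∉ P := notmem_prefix hdec
    have hPnd : P.Nodup := by
      have h := nodup_cellList b
      rw [hdec] at h
      exact (List.nodup_append.mp h).1
    rw [List.foldl_cons]
    have hgetc : (tabD b g).getD c c = g c := by rw [getD_tabD]; simp [hcellc]
    have hstep : (PySem.Dict.mk (groupsOf b g P)).insert ((tabD b g).getD c c)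
        (PySem.Set.add ((PySem.Dict.mk (groupsOf b g P)).getD ((tabD b g).getD c c) PySem.Set.empty) c)
        = PySem.Dict.mk (groupsOf b g (P ++ [c])) := by
      rw [hgetc]
      by_cases hroot : g c = c
      · rw [hroot]
        have hcont : (PySem.Dict.mk (groupsOf b g P)).contains c = false := by
          rw [← Bool.not_eq_true, PySem.Dict.contains_iff_mem_keys, keys_groupsOf]
          intro hmem
          exact hcP (List.mem_of_mem_filter hmem)
        have hget : (PySem.Dict.mk (groupsOf b g P)).getD c PySem.Set.empty = PySem.Set.empty :=
          PySem.Dict.getD_of_not_contains _ _ hcont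
        rw [hget]
        have haddempty : PySem.Set.add PySem.Set.empty c = [c] := by
          rw [PySem.Set.add_of_not_mem (by simp [PySem.Set.empty])]
          rfl
        rw [haddempty]
        apply PySem.Dict.ext
        rw [PySem.Dict.items_insert, hcont]
        simp only [Bool.false_eq_true, if_false, items_mk]
        unfold groupsOf
        have hfc : List.filter (fun c' => g c' == c') [c] = [c] := by simp [hroot]
        rw [List.filter_append, hfc, List.map_append]
        congr 1
        · refine List.map_congr_left ?_
          intro r hr
          have hrP : r ∈ P := List.mem_of_mem_filter hr
          have hgcr : List.filter (fun c' => g c' == r) [c] = [] := by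
            have hne : ¬ (g c == r) = true := by
              simp only [beq_iff_eq, hroot]
              exact fun he => hcP (he ▸ hrP)
            simp only [Bool.not_eq_true] at hne
            simp [List.filter, hne]
          rw [List.filter_append, hgcr, List.append_nil]
        · have hnone : P.filter (fun c' => g c' == c) = [] := by
            rw [List.filter_eq_nil_iff]
            intro p hp hgp
            rw [beq_iff_eq] at hgp
            have hcellp : isCell b p = true := mem_cellList.mp (by rw [hdec]; simp [hp])
            have hle : cellLe c p := by
              rw [← hgp]
              exact (hg p hcellp).2
            exact cellLt_irrefl c (cellLe_of_lt_trans hle (prefix_lt hdec p hp))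
          simp only [List.map_cons, List.map_nil]
          rw [List.filter_append, hnone]
          simp [hroot]
      · have hltrc : cellLt (g c) c = true := cellLt_of_le_of_ne (hg c hcellc).2 hroot
        have hcellr : isCell b (g c) = true := label_cell hg hcellc
        have hrP : g c ∈ P := mem_prefix_of_lt hdec (mem_cellList.mpr hcellr) hltrc
        have hrootr : g (g c) = g c := label_idem hg hs hcellc
        have hrfilter : g c ∈ P.filter (fun c' => g c' == c') := by
          rw [List.mem_filter]
          exact ⟨hrP, by simp [hrootr]⟩
        have hkeysnd : (PySem.Dict.mk (groupsOf b g P)).keys.Nodup := by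
          rw [keys_groupsOf]
          exact hPnd.filter _
        have hcont : (PySem.Dict.mk (groupsOf b g P)).contains (g c) = true := by
          rw [PySem.Dict.contains_iff_mem_keys, keys_groupsOf]
          exact hrfilter
        have hmemitems : ((g c, P.filter (fun c' => g c' == g c)) :
            (Int × Int) × PySem.Set (Int × Int)) ∈ (PySem.Dict.mk (groupsOf b g P)).items := by
          rw [items_mk]
          exact List.mem_map.mpr ⟨g c, hrfilter, rfl⟩
        have hget : (PySem.Dict.mk (groupsOf b g P)).getD (g c) PySem.Set.empty =
            P.filter (fun c' => g c' == g c) :=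
          PySem.Dict.getD_of_mem_items _ hmemitems hkeysnd _
        rw [hget]
        have hcnot : c ∉ P.filter (fun c' => g c' == g c) :=
          fun hmem => hcP (List.mem_of_mem_filter hmem)
        rw [PySem.Set.add_of_not_mem hcnot]
        apply PySem.Dict.ext
        rw [PySem.Dict.items_insert, hcont]
        simp only [if_true, items_mk]
        unfold groupsOf
        have hfc : List.filter (fun c' => g c' == c') [c] = [] := by simp [hroot]
        rw [List.filter_append, hfc, List.append_nil, List.map_map]
        refine List.map_congr_left ?_
        intro r hr
        by_cases hrr : r = g c
        · subst hrr
          simp only [Function.comp]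
          rw [if_pos (by simp)]
          rw [List.filter_append]
          simp
        · simp only [Function.comp]
          rw [if_neg (show ¬ ((r, P.filter (fun c' => g c' == r)).1 == g c) = true by simp [hrr])]
          have hgcr : List.filter (fun c' => g c' == r) [c] = [] := by
            have hne : (g c == r) = false := by
              simp only [beq_eq_false_iff_ne, ne_eq]
              exact fun he => hrr he.symm
            simp [List.filter, hne]
          rw [List.filter_append, hgcr, List.append_nil]
    rw [hstep]
    have := ih (P ++ [c]) hdec'
    rw [this]
    rw [List.append_assoc]
    rfl

lemma emitFold {b : List (List Int)} (g : (Int × Int) → (Int × Int)) :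
    ((PySem.Dict.mk (groupsOf b g (cellList b))).items.foldl (fun out rc =>
      if !(colorAt b rc.1 == 0) && 1 < PySem.Set.len rc.2 then
        out ++ [(rc.1.1, rc.1.2, (PySem.Set.len rc.2 : Int), rc.2)]
      else out) []) = entriesOf b g (cellList b) := by
  rw [items_mk]
  rw [PySem.List.foldl_append_if
    (p := fun rc : (Int × Int) × PySem.Set (Int × Int) => !(colorAt b rc.1 == 0) && 1 < PySem.Set.len rc.2)
    (f := fun rc : (Int × Int) × PySem.Set (Int × Int) => (rc.1.1, rc.1.2, (PySem.Set.len rc.2 : Int), rc.2))]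
  unfold groupsOf
  rw [List.filter_map, List.map_map]
  unfold entriesOf
  have hfilter : ((cellList b).filter (fun c => g c == c)).filter
      ((fun rc : (Int × Int) × PySem.Set (Int × Int) => !(colorAt b rc.1 == 0) && 1 < PySem.Set.len rc.2) ∘
        (fun r => (r, (cellList b).filter (fun c => g c == r)))) =
      (cellList b).filter (emitP b g) := by
    rw [List.filter_filter]
    refine List.filter_congr ?_
    intro c _
    refine boolExt ?_
    simp only [Function.comp, emitP, Bool.and_eq_true, decide_eq_true_eq, beq_iff_eq,
      Bool.not_eq_true', beq_eq_false_iff_ne, PySem.Set.len, compOf]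
    constructor
    · rintro ⟨⟨h1, h2⟩, h3⟩
      exact ⟨⟨h1, h3⟩, by exact_mod_cast h2⟩
    · rintro ⟨⟨h1, h3⟩, h2⟩
      exact ⟨⟨h1, by exact_mod_cast h2⟩, h3⟩
  rw [hfilter]
  simp only [List.nil_append]
  refine List.map_congr_left ?_
  intro c _
  simp only [Function.comp, entryOf, compOf, PySem.Set.len]

lemma good_id (b : List (List Int)) : GoodG b id :=
  fun c _ => ⟨Relation.ReflTransGen.refl, cellLe_refl c⟩

-- ===== VERDICT (by name: the statement is the Claim_ definition above) =====
theorem findAreas_spec : Claim_equal_findAreas := by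
  intro b _
  unfold Spec_findAreas
  obtain ⟨g, hloop, hg, hnc⟩ := relaxLoop_spec b
    ((cellList b).length * (cellList b).length + 1) id (good_id b)
    (by have := phiG_le b id; omega)
  have hs := stab_of_noupdate hg hnc
  have hA : findAreas b = entriesOf b g (cellList b) := by
    rw [findAreas_eq_foldCells b]
    have h := scanA hg hs (cellList b) [] PySem.Set.empty [] (by simp) ?_
    · simpa using h
    · intro q
      constructor
      · intro h
        simp [PySem.Set.empty] at h
      · rintro ⟨_, p, hp, _⟩
        exact absurd hp (List.not_mem_nil)
  have hB : findAreas_alt b = entriesOf b g (cellList b) := by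
    show ((cellList b).foldl (fun d c =>
        let r := (relaxLoop b ((cellList b).length * (cellList b).length + 1)
          ((cellList b).foldl (fun d c => d.insert c c) PySem.Dict.empty)).getD c c
        d.insert r (PySem.Set.add (d.getD r PySem.Set.empty) c)) PySem.Dict.empty).items.foldl _ [] =
      entriesOf b g (cellList b)
    rw [label0_eq b, hloop]
    have hgrp := groupScan hg hs (cellList b) [] (by simp)
    have hempty : (PySem.Dict.mk (groupsOf b g []) : PySem.Dict (Int × Int) (PySem.Set (Int × Int))) =
        PySem.Dict.empty := by
      rfl
    rw [hempty] at hgrp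
    rw [hgrp]
    simpa using emitFold (b := b) g
  rw [hA, hB]
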